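-- pv_equiv track=rewrite | github.com/jacopopezzuto/leetcode | 1452-people-whose-list-of-favorite-companies-is-not-a-subset-of-another-list/1452-people-whose-list-of-favorite-companies-is-not-a-subset-of-another-list.py | peopleIndexes
-- ===== SOURCE A (Python) =====
-- from typing import List
--
-- def peopleIndexes(favoriteCompanies: List[List[str]]) -> List[int]:
--     favoriteCompanies = [set(companies) for companies in favoriteCompanies]
--     result = []
--
--     for i, current in enumerate(favoriteCompanies):
--         is_subset = False
--         for j, other in enumerate(favoriteCompanies):
--             if i != j and current.issubset(other):
--                 is_subset = True
--                 break
--         if not is_subset: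
--             result.append(i)
--
--     return sorted(result)
-- ===== SOURCE B (Python) =====
-- def peopleIndexes(favoriteCompanies):
--     n = len(favoriteCompanies)
--     owners = {}
--     for i, companies in enumerate(favoriteCompanies):
--         for c in companies:
--             owners.setdefault(c, set()).add(i)
--     result = []
--     for i, companies in enumerate(favoriteCompanies):
--         inter = set(range(n))
--         for c in companies:
--             inter = inter & owners[c]
--         inter.discard(i)
--         if not inter:
--             result.append(i)
--     return result
-- ===== Notes on version B (the rewrite author's own statement) =====
-- stated objective: alternative
-- what changed: Replaces the quadratic all-pairs subset test with an inverted index (company -> set of owner indices): person i survives iff the intersection of the owner sets of i's companies, minus i itself, is empty; output is collected already in ascending order so no final sort is needed.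
import Mathlib
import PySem

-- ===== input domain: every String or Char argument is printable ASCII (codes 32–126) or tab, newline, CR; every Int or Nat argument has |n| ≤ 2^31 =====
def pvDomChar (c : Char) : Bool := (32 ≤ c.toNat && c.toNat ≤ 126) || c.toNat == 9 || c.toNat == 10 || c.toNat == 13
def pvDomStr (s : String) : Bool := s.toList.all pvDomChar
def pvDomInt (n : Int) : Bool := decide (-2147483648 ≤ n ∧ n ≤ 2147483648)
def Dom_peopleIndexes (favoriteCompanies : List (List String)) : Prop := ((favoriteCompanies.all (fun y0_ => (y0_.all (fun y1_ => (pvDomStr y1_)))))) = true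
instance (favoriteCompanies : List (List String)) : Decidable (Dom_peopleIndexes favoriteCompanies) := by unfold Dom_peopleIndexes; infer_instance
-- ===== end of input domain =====

-- B replaces A's quadratic pairwise subset scan by an inverted index (company → set of
-- owner indices) and per-person set intersections; the output is collected in ascending
-- index order directly, so no final sort is needed. Objective: alternative algorithm.

-- ===== PORT A =====
def peopleIndexes (favoriteCompanies : List (List String)) : List Int :=
  let favSets := favoriteCompanies.map (fun companies => PySem.Set.ofList companies)
  let result := (PySem.List.enumerate favSets).foldl
    (fun res p =>
      -- the inner 'for … if …: is_subset = True; break' loop sets only a flag: it is `any`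
      if !((PySem.List.enumerate favSets).any (fun q =>
            decide (p.1 ≠ q.1) && PySem.Set.issubset p.2 q.2))
      then res ++ [p.1] else res) []
  PySem.List.sorted result (fun x => x) false

-- ===== PORT B =====
def peopleIndexes_alt (favoriteCompanies : List (List String)) : List Int :=
  let n : Int := favoriteCompanies.length
  let owners : PySem.Dict String (PySem.Set Int) :=
    (PySem.List.enumerate favoriteCompanies).foldl
      (fun d p => p.2.foldl
        (fun d c => d.insert c (PySem.Set.add (d.getD c PySem.Set.empty) p.1)) d)
      PySem.Dict.empty
  (PySem.List.enumerate favoriteCompanies).foldl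
    (fun res p =>
      -- owners[c] never misses (c ∈ p.2 was inserted), so getD is exact here
      let inter := p.2.foldl
        (fun s c => PySem.Set.inter s (owners.getD c PySem.Set.empty))
        (PySem.Set.ofList (PySem.List.pyRange 0 n 1))
      if (PySem.Set.discard inter p.1).isEmpty then res ++ [p.1] else res) []

-- ===== PRECONDITION & SPEC =====
def Spec_peopleIndexes (favoriteCompanies : List (List String)) (out : List Int) : Prop := out = peopleIndexes_alt favoriteCompanies
instance (favoriteCompanies : List (List String)) (out : List Int) : Decidable (Spec_peopleIndexes favoriteCompanies out) := by unfold Spec_peopleIndexes; infer_instance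

-- ===== CLAIM (what is proved, stated in full; the proofs are below) =====
def Claim_equal_peopleIndexes : Prop := ∀ (favoriteCompanies : List (List String)), Dom_peopleIndexes favoriteCompanies → Spec_peopleIndexes favoriteCompanies (peopleIndexes favoriteCompanies)

-- ===== LEMMAS AND PROOFS =====

/-- One person's inner insertion loop: membership in the looked-up owner set. -/
theorem pv_owner_inner (comps : List String) (d : PySem.Dict String (PySem.Set Int))
    (i : Int) (c : String) (j : Int) :
    (j ∈ (comps.foldl (fun d c => d.insert c (PySem.Set.add (d.getD c PySem.Set.empty) i)) d).getD c PySem.Set.empty)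
      ↔ j ∈ d.getD c PySem.Set.empty ∨ (c ∈ comps ∧ j = i) := by
  induction comps generalizing d with
  | nil => simp
  | cons c' rest ih =>
    simp only [List.foldl_cons, ih, PySem.Dict.getD_insert]
    by_cases h : c = c'
    · subst h; simp [PySem.Set.mem_add]; tauto
    · simp [h]

/-- The whole inverted-index build: j is in owners[c] iff some enumerated person j owns c. -/
theorem pv_owner_mem (fav : List (List String)) (s : Int)
    (d : PySem.Dict String (PySem.Set Int)) (c : String) (j : Int) :
    (j ∈ ((PySem.List.enumerate fav s).foldl
        (fun d p => p.2.foldl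
          (fun d c => d.insert c (PySem.Set.add (d.getD c PySem.Set.empty) p.1)) d) d).getD c PySem.Set.empty)
      ↔ j ∈ d.getD c PySem.Set.empty ∨ ∃ p ∈ PySem.List.enumerate fav s, c ∈ p.2 ∧ j = p.1 := by
  induction fav generalizing s d with
  | nil => simp [PySem.List.enumerate_nil]
  | cons comps rest ih =>
    simp only [PySem.List.enumerate_cons, List.foldl_cons, ih, pv_owner_inner, List.mem_cons]
    constructor
    · rintro (((h | ⟨h1, h2⟩) | ⟨p, hp, h⟩))
      · exact Or.inl h
      · exact Or.inr ⟨(s, comps), Or.inl rfl, h1, h2⟩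
      · exact Or.inr ⟨p, Or.inr hp, h⟩
    · rintro (h | ⟨p, (rfl | hp), h⟩)
      · exact Or.inl (Or.inl h)
      · exact Or.inl (Or.inr h)
      · exact Or.inr ⟨p, hp, h⟩

/-- The intersection loop: membership in the folded intersection. -/
theorem pv_inter_mem (comps : List String) (owners : PySem.Dict String (PySem.Set Int))
    (init : PySem.Set Int) (j : Int) :
    (j ∈ comps.foldl (fun s c => PySem.Set.inter s (owners.getD c PySem.Set.empty)) init)
      ↔ j ∈ init ∧ ∀ c ∈ comps, j ∈ owners.getD c PySem.Set.empty := by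
  induction comps generalizing init with
  | nil => simp
  | cons c rest ih =>
    simp only [List.foldl_cons, ih, PySem.Set.mem_inter, List.mem_cons]
    constructor
    · rintro ⟨⟨h1, h2⟩, h3⟩
      exact ⟨h1, fun c' hc' => hc'.elim (fun e => e ▸ h2) (h3 c')⟩
    · rintro ⟨h1, h2⟩
      exact ⟨⟨h1, h2 c (Or.inl rfl)⟩, fun c' hc' => h2 c' (Or.inr hc')⟩

theorem pv_enumerate_map {α β : Type} (f : α → β) (l : List α) (s : Int) :
    PySem.List.enumerate (l.map f) s = (PySem.List.enumerate l s).map (fun p => (p.1, f p.2)) := by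
  induction l generalizing s with
  | nil => simp [PySem.List.enumerate_nil]
  | cons x xs ih => simp [PySem.List.enumerate_cons, ih]

/-- The crux: for any (index, companies) pair, A's "no strict other superset" flag equals
    B's "intersection of owner sets minus self is empty" test. -/
theorem pv_pred_eq (fav : List (List String)) (i : Int) (comps : List String) :
    (!(((PySem.List.enumerate fav 0).map (fun p => (p.1, PySem.Set.ofList p.2))).any (fun q =>
        decide (i ≠ q.1) && PySem.Set.issubset (PySem.Set.ofList comps) q.2)))
    = (PySem.Set.discard
        (comps.foldl
          (fun s c => PySem.Set.inter s
            (((PySem.List.enumerate fav 0).foldl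
              (fun d p => p.2.foldl
                (fun d c => d.insert c (PySem.Set.add (d.getD c PySem.Set.empty) p.1)) d)
              PySem.Dict.empty).getD c PySem.Set.empty))
          (PySem.Set.ofList (PySem.List.pyRange 0 (fav.length : Int) 1))) i).isEmpty := by
  rw [Bool.eq_iff_iff]
  simp [PySem.Set.mem_discard, PySem.Set.mem_ofList,
    PySem.List.mem_enumerate_iff, PySem.Set.issubset_iff,
    List.isEmpty_iff, List.eq_nil_iff_forall_not_mem]
  constructor
  · intro hA a ha
    obtain ⟨hinit, hall⟩ := (pv_inter_mem comps _ _ a).mp ha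
    rw [PySem.Set.mem_ofList, PySem.List.mem_pyRange_one] at hinit
    by_contra hai
    have hk : a.toNat < fav.length := by omega
    obtain ⟨c, hc, hcb⟩ := hA a fav[a.toNat] a.toNat hk (by omega) rfl (fun h => hai h.symm)
    rcases Iff.mp (pv_owner_mem fav 0 PySem.Dict.empty c a) (hall c hc) with h | ⟨p, hp, hcp, hap⟩
    · simp [PySem.Dict.getD_empty] at h
    · obtain ⟨k', hk', rfl⟩ := Iff.mp (PySem.List.mem_enumerate_iff fav 0 p) hp
      simp at hap hcp
      have : k' = a.toNat := by omega
      exact hcb (this ▸ hcp)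
  · intro hB a b x hx ha hb hia
    by_contra hno
    push Not at hno
    have hmem := hB (x : Int) ((pv_inter_mem comps _ _ (x : Int)).mpr
      ⟨by rw [PySem.Set.mem_ofList, PySem.List.mem_pyRange_one]; omega,
       fun c hc => (pv_owner_mem fav 0 PySem.Dict.empty c (x : Int)).mpr
        (Or.inr ⟨((0 : Int) + x, fav[x]), Iff.mpr (PySem.List.mem_enumerate_iff fav 0 ((0 : Int) + x, fav[x])) ⟨x, hx, rfl⟩,
          by rw [← hb]; exact hno c hc, by simp⟩)⟩)
    exact hia (ha ▸ hmem.symm)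

-- ===== VERDICT (by name: the statement is the Claim_ definition above) =====
theorem peopleIndexes_spec : Claim_equal_peopleIndexes := by
  intro fav _
  unfold Spec_peopleIndexes peopleIndexes peopleIndexes_alt
  simp only []
  rw [PySem.List.foldl_append_if, PySem.List.foldl_append_if]
  simp only [List.nil_append]
  rw [pv_enumerate_map, List.filter_map, List.map_map]
  simp only [Function.comp_def]
  rw [List.filter_congr (fun p _ => pv_pred_eq fav p.1 p.2)]
  apply PySem.List.sorted_eq_self_of_pairwise
  refine List.pairwise_map.mpr ?_
  exact ((PySem.List.pairwise_lt_enumerate fav 0).filter _).imp (fun h => le_of_lt h)
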